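-- pv_equiv track=rewrite | github.com/Armaan-RashidPathan/rl_trading_agent | src/data/data_pipeline.py | get_feature_split
-- ===== SOURCE A (Python) =====
-- def get_feature_split(feature_names):
--     """
--     Split feature names into price/technical vs sentiment.
--     Useful for creating the SentimentPPOAgent.
--
--     Returns:
--         price_feature_names: list
--         sentiment_feature_names: list
--     """
--     sentiment_cols = [
--         'sentiment_score', 'sentiment_std',
--         'positive_ratio', 'news_count', 'sentiment_momentum'
--     ]
--
--     sent_features = [f for f in feature_names if f in sentiment_cols]
--     price_features = [f for f in feature_names if f not in sentiment_cols]
--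
--     return price_features, sent_features
-- ===== SOURCE B (Python) =====
-- def get_feature_split(feature_names):
--     """Destructive extraction: copy the input, scan indices backwards and
--     pop sentiment names out of the copy; what remains is the price list."""
--     sentiment_cols = [
--         'sentiment_score', 'sentiment_std',
--         'positive_ratio', 'news_count', 'sentiment_momentum'
--     ]
--     price_features = list(feature_names)
--     sent_features = []
--     for i in range(len(price_features) - 1, -1, -1):
--         if price_features[i] in sentiment_cols:
--             sent_features.append(price_features.pop(i))
--     sent_features.reverse()
--     return price_features, sent_features
-- ===== Notes on version B (the rewrite author's own statement) =====
-- stated objective: alternative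
-- what changed: Instead of A's two filtering comprehensions, B copies the input once and extracts sentiment names destructively: a backwards index scan pops each sentiment name out of the copy (so the remainder is the price list) and reverses the collected matches at the end.
import Mathlib
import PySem

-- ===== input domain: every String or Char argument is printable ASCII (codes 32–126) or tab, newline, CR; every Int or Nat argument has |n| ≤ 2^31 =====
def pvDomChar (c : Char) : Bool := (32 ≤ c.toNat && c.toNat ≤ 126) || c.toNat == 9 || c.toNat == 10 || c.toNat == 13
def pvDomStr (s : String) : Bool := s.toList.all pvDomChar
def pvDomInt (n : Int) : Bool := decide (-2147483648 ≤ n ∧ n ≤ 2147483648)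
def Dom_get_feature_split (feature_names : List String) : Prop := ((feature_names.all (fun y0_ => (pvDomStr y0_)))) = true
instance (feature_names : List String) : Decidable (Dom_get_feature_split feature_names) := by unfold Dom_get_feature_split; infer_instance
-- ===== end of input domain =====

-- B replaces A's two filtering comprehensions with destructive extraction: copy the input, scan
-- backwards, pop sentiment names out of the copy (the remainder is the price list), reverse the
-- collected matches (alternative decomposition, same cost; B mutates only its own copy).


-- ===== PORT A =====
def pvSentimentCols : List String :=
  ["sentiment_score", "sentiment_std", "positive_ratio", "news_count", "sentiment_momentum"]

-- A: two comprehensions, sent_features then price_features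
def get_feature_split (feature_names : List String) : List String × List String :=
  let sentiment_cols := pvSentimentCols
  let sent_features := feature_names.filter (fun f => sentiment_cols.contains f)
  let price_features := feature_names.filter (fun f => !sentiment_cols.contains f)
  (price_features, sent_features)

-- ===== PORT B =====
-- B's loop: 'for i in range(len(price)-1, -1, -1): if price[i] in sentiment_cols: sent.append(price.pop(i))'
-- i counts down; the fuel argument is i+1 (indices i, i-1, …, 0 remain to be processed).
def pvLoopB : Nat → List String → List String → List String × List String
  | 0, price, sent => (price, sent.reverse)
  | (i+1), price, sent =>
    match PySem.List.pyGet? price (i : Int) with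
    | none => (price, sent.reverse)   -- unreachable: i is always in range
    | some x =>
      if pvSentimentCols.contains x then
        match PySem.List.pop? price (i : Int) with
        | none => (price, sent.reverse)   -- unreachable
        | some (y, rest) => pvLoopB i rest (sent ++ [y])
      else pvLoopB i price sent

def get_feature_split_alt (feature_names : List String) : List String × List String :=
  let price_features := feature_names   -- list(feature_names): a fresh copy
  pvLoopB price_features.length price_features []

-- ===== PRECONDITION & SPEC =====
def Spec_get_feature_split (feature_names : List String) (out : List String × List String) : Prop := out = get_feature_split_alt feature_names
instance (feature_names : List String) (out : List String × List String) : Decidable (Spec_get_feature_split feature_names out) := by unfold Spec_get_feature_split; infer_instance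

-- ===== CLAIM (what is proved, stated in full; the proofs are below) =====
def Claim_equal_get_feature_split : Prop := ∀ (feature_names : List String), Dom_get_feature_split feature_names → Spec_get_feature_split feature_names (get_feature_split feature_names)

-- ===== LEMMAS AND PROOFS =====

-- Invariant: with fuel pre.length over pre ++ rest, the loop turns pre's non-sentiment part into
-- the prefix of the price list and appends pre's sentiment part (reversed) to sent.
theorem pvLoopB_spec (pre rest sent : List String) :
    pvLoopB pre.length (pre ++ rest) sent
      = (pre.filter (fun f => !pvSentimentCols.contains f) ++ rest,
         (sent ++ (pre.filter (fun f => pvSentimentCols.contains f)).reverse).reverse) := by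
  induction pre using List.reverseRecOn generalizing rest sent with
  | nil => simp [pvLoopB]
  | append_singleton p a ih =>
    have hlen : (p ++ [a]).length = p.length + 1 := by simp
    rw [hlen]
    have hget : PySem.List.pyGet? ((p ++ [a]) ++ rest) ((p.length : Nat) : Int) = some a := by
      have : (p ++ [a]) ++ rest = p ++ a :: rest := by simp
      rw [this]
      exact PySem.List.pyGet?_append_length p rest a
    by_cases h : pvSentimentCols.contains a = true
    · have hpop : PySem.List.pop? ((p ++ [a]) ++ rest) ((p.length : Nat) : Int)
          = some (a, p ++ rest) := by
        have hlt : p.length < ((p ++ [a]) ++ rest).length := by simp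
        rw [PySem.List.pop?_natCast _ _ hlt]
        have h1 : ((p ++ [a]) ++ rest)[p.length] = a := by
          have : (p ++ [a]) ++ rest = p ++ a :: rest := by simp
          simp [this]
        have h2 : ((p ++ [a]) ++ rest).eraseIdx p.length = p ++ rest := by
          have : (p ++ [a]) ++ rest = p ++ a :: rest := by simp
          rw [this, List.eraseIdx_append_of_length_le (by omega)]
          simp
        rw [h1, h2]
      simp only [pvLoopB, hget, hpop, h, if_pos]
      rw [ih]
      simp only [List.contains_eq_mem] at h
      simp [List.filter_append, List.filter_cons, h]
    · simp only [pvLoopB, hget, h]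
      rw [if_neg (by simp [h])]
      have : (p ++ [a]) ++ rest = p ++ ([a] ++ rest) := by simp
      rw [this, ih]
      simp only [List.contains_eq_mem] at h
      simp [List.filter_append, List.filter_cons, h]

-- ===== VERDICT (by name: the statement is the Claim_ definition above) =====
theorem get_feature_split_spec : Claim_equal_get_feature_split := by
  intro feature_names _
  unfold Spec_get_feature_split get_feature_split get_feature_split_alt
  have := pvLoopB_spec feature_names [] []
  simp only [List.append_nil] at this
  rw [this]
  simp
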